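-- pv_equiv track=rewrite | github.com/ccfelius/crypto | kasiski_analyis.py | ngram_indices
-- ===== SOURCE A (Python) =====
-- def ngram_indices(ngrams):
--
--     # Create dict with key = ngram and value = # occurences
--     ngram_dict = dict()
--     for i in ngrams:
--         ngram_dict[i] = ngram_dict.get(i, 0) + 1
--         ngram_dict = {k: v for k, v in sorted(ngram_dict.items(), key=lambda item: item[1], reverse=True)}
--
--     # Count indices of ngrams
--     ngram_idict = dict()
--     for i in ngram_dict.keys():
--         indices = []
--         for j in range(len(ngrams)):
--             if ngrams[j] == i:
--                 indices.append(j+1)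
--
--         ngram_idict[i] = indices
--
--     return ngram_dict, ngram_idict
-- ===== SOURCE B (Python) =====
-- def ngram_indices(ngrams):
--     counts = {}
--     last = {}
--     for j, g in enumerate(ngrams):
--         counts[g] = counts.get(g, 0) + 1
--         last[g] = j
--     order = sorted(counts, key=lambda g: (-counts[g], last[g]))
--     groups = {}
--     for j, g in enumerate(ngrams):
--         groups.setdefault(g, []).append(j + 1)
--     return {g: counts[g] for g in order}, {g: groups[g] for g in order}
-- ===== Notes on version B (the rewrite author's own statement) =====
-- stated objective: faster
-- what changed: B counts occurrences and last-occurrence positions in one pass and sorts the distinct ngrams once by (-count, last occurrence) -- the order A reaches by re-sorting the whole dict after every element -- and collects the 1-based index lists in a single enumerate pass instead of rescanning the whole list for every key.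
import Mathlib
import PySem

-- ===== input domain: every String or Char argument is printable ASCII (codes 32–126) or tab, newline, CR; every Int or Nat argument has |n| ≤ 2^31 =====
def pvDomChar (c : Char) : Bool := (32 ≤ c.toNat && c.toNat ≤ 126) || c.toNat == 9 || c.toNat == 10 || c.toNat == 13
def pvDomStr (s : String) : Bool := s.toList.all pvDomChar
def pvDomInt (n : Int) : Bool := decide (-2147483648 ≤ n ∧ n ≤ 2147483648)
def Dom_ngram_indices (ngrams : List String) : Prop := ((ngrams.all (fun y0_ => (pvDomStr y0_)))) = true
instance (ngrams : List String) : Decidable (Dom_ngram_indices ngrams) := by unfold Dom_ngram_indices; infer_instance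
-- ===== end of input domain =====

-- B counts occurrences and last-occurrence positions in one pass and sorts the distinct ngrams
-- once by (-count, last occurrence), instead of A's full stable re-sort of the count dict after
-- every element and per-key rescan of the input for the index lists.

-- ===== PORT A =====
-- loop body of A's counting loop: ngram_dict[i] = ngram_dict.get(i, 0) + 1, then rebuild the
-- dict from its items stably sorted by value, descending ({k: v for k, v in sorted(..., reverse=True)})
def pvStepA (d : PySem.Dict String Int) (i : String) : PySem.Dict String Int :=
  PySem.Dict.ofList (PySem.List.sorted (d.insert i (d.getD i 0 + 1)).items (fun p => p.2) true)

-- inner loop of A's second loop: indices = []; for j in range(len(ngrams)): if ngrams[j] == i: indices.append(j+1)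
-- (j always lies in range, so Python's 'ngrams[j] == i' is exactly 'pyGet? ngrams j == some i')
def pvIndicesA (ngrams : List String) (i : String) : List Int :=
  (PySem.List.pyRange 0 (PySem.List.len ngrams)).foldl
    (fun acc j => if PySem.List.pyGet? ngrams j == some i then acc ++ [j + 1] else acc) []

def ngram_indices (ngrams : List String) : (List (String × Int)) × (List (String × List Int)) :=
  let ngram_dict := ngrams.foldl pvStepA PySem.Dict.empty
  let ngram_idict := ngram_dict.keys.foldl
    (fun di i => di.insert i (pvIndicesA ngrams i)) PySem.Dict.empty
  (ngram_dict.items, ngram_idict.items)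

-- ===== PORT B =====
def ngram_indices_alt (ngrams : List String) : (List (String × Int)) × (List (String × List Int)) :=
  -- for j, g in enumerate(ngrams): counts[g] = counts.get(g, 0) + 1; last[g] = j
  let cl := (PySem.List.enumerate ngrams).foldl
    (fun cl p => (cl.1.insert p.2 (cl.1.getD p.2 0 + 1), cl.2.insert p.2 p.1))
    ((PySem.Dict.empty : PySem.Dict String Int), (PySem.Dict.empty : PySem.Dict String Int))
  -- order = sorted(counts, key=lambda g: (-counts[g], last[g])); the keys iterated are counts'
  -- keys, so counts[g] and last[g] hit existing keys: the lookups are get?, defaulted for totality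
  let order := PySem.List.sorted2 cl.1.keys
    (fun g => -((cl.1.get? g).getD 0)) (fun g => (cl.2.get? g).getD 0) false
  -- for j, g in enumerate(ngrams): groups.setdefault(g, []).append(j + 1)
  let groups := (PySem.List.enumerate ngrams).foldl
    (fun d p => d.modify p.2 [] (fun v => v ++ [p.1 + 1])) PySem.Dict.empty
  -- {g: counts[g] for g in order}, {g: groups[g] for g in order} (every g in order is a key of both)
  let d1 := order.foldl (fun d g => d.insert g ((cl.1.get? g).getD 0)) PySem.Dict.empty
  let d2 := order.foldl (fun d g => d.insert g ((groups.get? g).getD [])) PySem.Dict.empty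
  (d1.items, d2.items)

-- ===== PRECONDITION & SPEC =====
def Spec_ngram_indices (ngrams : List String) (out : (List (String × Int)) × (List (String × List Int))) : Prop := out = ngram_indices_alt ngrams
instance (ngrams : List String) (out : (List (String × Int)) × (List (String × List Int))) : Decidable (Spec_ngram_indices ngrams out) := by unfold Spec_ngram_indices; infer_instance

-- ===== CLAIM (what is proved, stated in full; the proofs are below) =====
def Claim_equal_ngram_indices : Prop := ∀ (ngrams : List String), Dom_ngram_indices ngrams → Spec_ngram_indices ngrams (ngram_indices ngrams)

-- ===== LEMMAS AND PROOFS =====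

-- proof-side bridge: the net effect of A's loop body on the dict's item list
def pvBump (order : List (String × Int)) (g : String) : List (String × Int) :=
  let c := ((order.find? (fun e => e.1 == g)).map (fun e => e.2)).getD 0
  (order.filter (fun e => decide (c < e.2))) ++ (g, c + 1) :: (order.filter (fun e => decide (e.2 ≤ c) && e.1 != g))

def pvInv (l : List (String × Int)) : Prop :=
  l.Pairwise (fun a b : String × Int => b.2 ≤ a.2) ∧ (l.map Prod.fst).Nodup ∧ ∀ e ∈ l, 1 ≤ e.2

lemma pv_foldl_ins (v : List (String × Int)) (acc : List (String × Int))
    (h : (acc ++ v).Pairwise (fun a b : String × Int => b.2 ≤ a.2)) :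
    v.foldl (fun a x => PySem.List.insertBy (fun a b : String × Int => decide (b.2 < a.2)) x a) acc
      = acc ++ v := by
  induction v generalizing acc with
  | nil => simp
  | cons y v ih =>
    have hy : ∀ z ∈ acc, (decide (z.2 < y.2) : Bool) = false := by
      intro z hz
      rcases List.pairwise_append.1 h with ⟨-, -, hcross⟩
      simpa using not_lt.2 (hcross z hz y (by simp))
    rw [List.foldl_cons, PySem.List.insertBy_of_forall_not_before _ _ _ hy]
    have := ih (acc ++ [y]) (by simpa [List.append_assoc] using h)
    simpa [List.append_assoc] using this

lemma pv_insertBy_append (x : String × Int) (hi lo : List (String × Int))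
    (h : ∀ y ∈ hi, (decide (y.2 < x.2) : Bool) = false) :
    PySem.List.insertBy (fun a b : String × Int => decide (b.2 < a.2)) x (hi ++ lo)
      = hi ++ PySem.List.insertBy (fun a b : String × Int => decide (b.2 < a.2)) x lo := by
  induction hi with
  | nil => simp
  | cons z hi ih =>
    have hz := h z (by simp)
    simp only [List.cons_append, PySem.List.insertBy, hz, Bool.false_eq_true, if_false]
    rw [ih (fun y hy => h y (by simp [hy]))]

lemma pv_insertBy_front (x : String × Int) (m : List (String × Int))
    (h : ∀ y ∈ m, y.2 < x.2) :
    PySem.List.insertBy (fun a b : String × Int => decide (b.2 < a.2)) x m = x :: m := by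
  cases m with
  | nil => rfl
  | cons y m =>
    have : (decide (y.2 < x.2) : Bool) = true := by simpa using h y (by simp)
    simp [PySem.List.insertBy, this]

lemma pv_dropWhile_eq (c : Int) (L : List (String × Int))
    (hP : L.Pairwise (fun a b : String × Int => b.2 ≤ a.2)) (hge : ∀ y ∈ L, c ≤ y.2) :
    ∀ y ∈ L.dropWhile (fun e => decide (c < e.2)), y.2 = c := by
  induction L with
  | nil => simp
  | cons z L ih =>
    by_cases hz : c < z.2
    · rw [List.dropWhile_cons_of_pos (by simpa using hz)]
      exact ih hP.of_cons (fun y hy => hge y (by simp [hy]))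
    · rw [List.dropWhile_cons_of_neg (by simpa using hz)]
      have hzc : z.2 = c := le_antisymm (not_lt.1 hz) (hge z (by simp))
      intro y hy
      rcases List.mem_cons.1 hy with rfl | hy
      · exact hzc
      · exact le_antisymm (hzc ▸ (List.pairwise_cons.1 hP).1 y hy) (hge y (by simp [hy]))

lemma pv_items_ofList (ps : List (String × Int)) (h : (ps.map Prod.fst).Nodup) :
    (PySem.Dict.ofList ps).items = ps := by
  have := PySem.Dict.items_foldl_insert_fresh ps (fun p => p.1) (fun p => p.2) PySem.Dict.empty
      (by intro a _; simp [PySem.Dict.contains_empty]) (by simpa using h)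
  simpa [PySem.Dict.ofList, PySem.Dict.update, PySem.Dict.empty] using this

lemma pv_step_eq (l : List (String × Int)) (x : String) (hInv : pvInv l) :
    (pvStepA (PySem.Dict.mk l) x).items = pvBump l x ∧ pvInv (pvBump l x) := by
  obtain ⟨hP, hnd, h1⟩ := hInv
  cases hfo : l.find? (fun e => e.1 == x) with
  | none =>
    have hxall : ∀ e ∈ l, (e.1 == x) = false := by
      intro e he
      simpa using List.find?_eq_none.1 hfo e he
    have hcont : (PySem.Dict.mk l).contains x = false := by
      simp only [PySem.Dict.contains]
      exact List.any_eq_false.2 (fun e he => by simp [hxall e he])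
    have hgetD : (PySem.Dict.mk l).getD x 0 = 0 := by
      simp [PySem.Dict.getD, PySem.Dict.get?, hfo]
    have hitems : ((PySem.Dict.mk l).insert x ((PySem.Dict.mk l).getD x 0 + 1)).items
        = l ++ [(x, 1)] := by
      rw [PySem.Dict.items_insert_of_not_contains _ _ hcont, hgetD]
      norm_num
    have hpair : (l ++ [(x, (1:Int))]).Pairwise (fun a b : String × Int => b.2 ≤ a.2) := by
      rw [List.pairwise_append]
      refine ⟨hP, by simp, ?_⟩
      intro a ha b hb
      simp only [List.mem_singleton] at hb
      subst hb
      exact h1 a ha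
    have hndnew : ((l ++ [(x, (1:Int))]).map Prod.fst).Nodup := by
      rw [List.map_append, List.nodup_append]
      refine ⟨hnd, by simp, ?_⟩
      intro a ha b hb
      have hbx : b = x := by simpa using hb
      subst hbx
      obtain ⟨e, he, hfst⟩ := List.mem_map.1 ha
      intro hax
      subst hax
      exact absurd (beq_iff_eq.2 hfst) (by simp [hxall e he])
    have hbump : pvBump l x = l ++ [(x, 1)] := by
      unfold pvBump
      rw [hfo]
      simp only [Option.map_none, Option.getD_none]
      rw [List.filter_eq_self.2 (fun e he => by
            simpa using lt_of_lt_of_le one_pos (h1 e he)),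
          List.filter_eq_nil_iff.2 (fun e he => by
            have := h1 e he
            simp only [Bool.and_eq_true, decide_eq_true_eq]
            rintro ⟨h2, -⟩
            omega)]
      rfl
    constructor
    · unfold pvStepA
      rw [hitems, PySem.List.sorted_rev_eq_self_of_pairwise _ _ hpair,
          pv_items_ofList _ hndnew, hbump]
    · rw [hbump]
      refine ⟨hpair, hndnew, ?_⟩
      intro e he
      rcases List.mem_append.1 he with he | he
      · exact h1 e he
      · simp only [List.mem_singleton] at he
        subst he
        norm_num
  | some e₀ =>
    have he₀x : e₀.1 = x := by simpa using List.find?_some hfo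
    have he₀l : e₀ ∈ l := List.mem_of_find?_eq_some hfo
    obtain ⟨x', c⟩ := e₀
    dsimp at he₀x
    subst x'
    have hcge1 : 1 ≤ c := h1 (x, c) he₀l
    obtain ⟨l₁, l₂, rfl⟩ := List.append_of_mem he₀l
    -- key facts
    have hndflat : (l₁.map Prod.fst ++ x :: l₂.map Prod.fst).Nodup := by
      simpa [List.map_append] using hnd
    have hndmid := List.nodup_middle.1 hndflat
    have hx12 : x ∉ l₁.map Prod.fst ++ l₂.map Prod.fst := (List.nodup_cons.1 hndmid).1
    have hx1 : x ∉ l₁.map Prod.fst := fun h => hx12 (List.mem_append_left _ h)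
    have hx2 : x ∉ l₂.map Prod.fst := fun h => hx12 (List.mem_append_right _ h)
    have hne1 : ∀ p ∈ l₁, (p.1 == x) = false :=
      fun p hp => beq_eq_false_iff_ne.2 (fun h => hx1 (List.mem_map.2 ⟨p, hp, h⟩))
    have hne2 : ∀ p ∈ l₂, (p.1 == x) = false :=
      fun p hp => beq_eq_false_iff_ne.2 (fun h => hx2 (List.mem_map.2 ⟨p, hp, h⟩))
    rw [List.pairwise_append] at hP
    obtain ⟨hP1, hPc, hc1⟩ := hP
    have h2c : ∀ b ∈ l₂, b.2 ≤ c := fun b hb => (List.pairwise_cons.1 hPc).1 b hb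
    have hP2 : l₂.Pairwise (fun a b : String × Int => b.2 ≤ a.2) := (List.pairwise_cons.1 hPc).2
    have h1c : ∀ a ∈ l₁, c ≤ a.2 := fun a ha => hc1 a ha (x, c) (List.mem_cons_self)
    have hcross : ∀ a ∈ l₁, ∀ b ∈ l₂, b.2 ≤ a.2 :=
      fun a ha b hb => hc1 a ha b (List.mem_cons_of_mem _ hb)
    set hi := l₁.takeWhile (fun e : String × Int => decide (c < e.2)) with hhidef
    set m := l₁.dropWhile (fun e : String × Int => decide (c < e.2)) with hmdef
    have hsplit : hi ++ m = l₁ := List.takeWhile_append_dropWhile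
    have hhiP : ∀ y ∈ hi, c < y.2 := fun y hy => by simpa using List.mem_takeWhile_imp hy
    have hmP : ∀ y ∈ m, y.2 = c := pv_dropWhile_eq c l₁ hP1 h1c
    have hhisub : ∀ y ∈ hi, y ∈ l₁ := fun y hy => hsplit ▸ List.mem_append_left _ hy
    have hmsub : ∀ y ∈ m, y ∈ l₁ := fun y hy => hsplit ▸ List.mem_append_right _ hy
    have hPhi : hi.Pairwise (fun a b : String × Int => b.2 ≤ a.2) :=
      List.Pairwise.sublist (List.takeWhile_sublist _) hP1
    have hPm : m.Pairwise (fun a b : String × Int => b.2 ≤ a.2) :=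
      List.Pairwise.sublist (List.dropWhile_sublist _) hP1
    -- dict-side computations
    have hcont : (PySem.Dict.mk (l₁ ++ (x, c) :: l₂)).contains x = true := by
      simp only [PySem.Dict.contains]
      exact List.any_eq_true.2 ⟨(x, c), by simp, by simp⟩
    have hgetD : (PySem.Dict.mk (l₁ ++ (x, c) :: l₂)).getD x 0 = c := by
      simp [PySem.Dict.getD, PySem.Dict.get?, hfo]
    have hmap1 : l₁.map (fun p : String × Int => if (p.1 == x) = true then (x, c + 1) else p) = l₁ := by
      conv_rhs => rw [← List.map_id l₁]
      exact List.map_congr_left (fun p hp => by simp [hne1 p hp])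
    have hmap2 : l₂.map (fun p : String × Int => if (p.1 == x) = true then (x, c + 1) else p) = l₂ := by
      conv_rhs => rw [← List.map_id l₂]
      exact List.map_congr_left (fun p hp => by simp [hne2 p hp])
    have hitems : ((PySem.Dict.mk (l₁ ++ (x, c) :: l₂)).insert x
          ((PySem.Dict.mk (l₁ ++ (x, c) :: l₂)).getD x 0 + 1)).items
        = l₁ ++ (x, c + 1) :: l₂ := by
      rw [hgetD, PySem.Dict.items_insert_of_contains _ _ hcont]
      rw [List.map_append, List.map_cons, hmap1, hmap2]
      norm_num
    -- total ordering of the target arrangement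
    have hPtot : ((hi ++ (x, c + 1) :: m) ++ l₂).Pairwise (fun a b : String × Int => b.2 ≤ a.2) := by
      rw [List.pairwise_append]
      refine ⟨?_, hP2, ?_⟩
      · rw [List.pairwise_append]
        refine ⟨hPhi, ?_, ?_⟩
        · rw [List.pairwise_cons]
          exact ⟨fun y hy => by have := hmP y hy; dsimp; omega, hPm⟩
        · intro a ha b hb
          rcases List.mem_cons.1 hb with rfl | hb
          · have := hhiP a ha; dsimp; omega
          · have := hmP b hb; have := hhiP a ha; omega
      · intro a ha b hb
        have hb2 : b.2 ≤ c := h2c b hb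
        rcases List.mem_append.1 ha with ha | ha
        · have := hhiP a ha; omega
        · rcases List.mem_cons.1 ha with rfl | ha
          · dsimp; omega
          · have := hmP a ha; omega
    -- sorted computation
    have hu : PySem.List.sorted (l₁ ++ (x, c + 1) :: l₂) (fun p : String × Int => p.2) true
        = (hi ++ (x, c + 1) :: m) ++ l₂ := by
      rw [PySem.List.sorted_rev_eq_foldl_insertBy]
      show List.foldl (fun acc y => PySem.List.insertBy
            (fun a b : String × Int => decide (b.2 < a.2)) y acc) [] (l₁ ++ (x, c + 1) :: l₂)
          = (hi ++ (x, c + 1) :: m) ++ l₂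
      rw [← hsplit, List.foldl_append, List.foldl_cons]
      rw [pv_foldl_ins (hi ++ m) [] (by simpa using (hsplit ▸ hP1 : (hi ++ m).Pairwise _))]
      rw [List.nil_append]
      rw [pv_insertBy_append (x, c + 1) hi m
            (fun y hy => by have := hhiP y hy; simp; omega)]
      rw [pv_insertBy_front (x, c + 1) m
            (fun y hy => by have := hmP y hy; dsimp; omega)]
      rw [pv_foldl_ins l₂ (hi ++ (x, c + 1) :: m) (hPtot)]
    -- bump side
    have hfil1 : (l₁ ++ (x, c) :: l₂).filter (fun e : String × Int => decide (c < e.2)) = hi := by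
      rw [← hsplit]
      have e1 : List.filter (fun e : String × Int => decide (c < e.2)) hi = hi :=
        List.filter_eq_self.2 (fun y hy => by simpa using hhiP y hy)
      have e2 : List.filter (fun e : String × Int => decide (c < e.2)) m = [] :=
        List.filter_eq_nil_iff.2 (fun y hy => by have := hmP y hy; simp; omega)
      have e3 : List.filter (fun e : String × Int => decide (c < e.2)) l₂ = [] :=
        List.filter_eq_nil_iff.2 (fun y hy => by have := h2c y hy; simp; omega)
      simp [List.filter_append, e1, e2, e3]
    have hfil2 : (l₁ ++ (x, c) :: l₂).filter
          (fun e : String × Int => decide (e.2 ≤ c) && e.1 != x) = m ++ l₂ := by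
      rw [← hsplit]
      have e1 : List.filter (fun e : String × Int => decide (e.2 ≤ c) && e.1 != x) hi = [] :=
        List.filter_eq_nil_iff.2 (fun y hy => by
          have := hhiP y hy
          simp only [Bool.and_eq_true, decide_eq_true_eq, not_and]
          intro h2
          omega)
      have e2 : List.filter (fun e : String × Int => decide (e.2 ≤ c) && e.1 != x) m = m :=
        List.filter_eq_self.2 (fun y hy => by
          have h2 := hmP y hy
          have h3 := hne1 y (hmsub y hy)
          simp only [Bool.and_eq_true, decide_eq_true_eq, bne_iff_ne, ne_eq]
          exact ⟨by omega, fun h => by simp [h] at h3⟩)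
      have e3 : List.filter (fun e : String × Int => decide (e.2 ≤ c) && e.1 != x) l₂ = l₂ :=
        List.filter_eq_self.2 (fun y hy => by
          have h2 := h2c y hy
          have h3 := hne2 y hy
          simp only [Bool.and_eq_true, decide_eq_true_eq, bne_iff_ne, ne_eq]
          exact ⟨h2, fun h => by simp [h] at h3⟩)
      simp [List.filter_append, e1, e2, e3]
    have hbump : pvBump (l₁ ++ (x, c) :: l₂) x = hi ++ (x, c + 1) :: (m ++ l₂) := by
      unfold pvBump
      rw [hfo]
      simp only [Option.map_some, Option.getD_some]
      exact congrArg₂ (· ++ ·) hfil1 (congrArg ((x, c + 1) :: ·) hfil2)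
    -- nodup of the new arrangement
    have hmapsplit : l₁.map Prod.fst = hi.map Prod.fst ++ m.map Prod.fst := by
      rw [← hsplit, List.map_append]
    have hperm : (l₁.map Prod.fst ++ x :: l₂.map Prod.fst).Perm
        (hi.map Prod.fst ++ x :: (m.map Prod.fst ++ l₂.map Prod.fst)) := by
      rw [hmapsplit]
      simp only [List.append_assoc]
      exact List.Perm.append_left _ List.perm_middle
    have hndnew : ((hi ++ (x, c + 1) :: (m ++ l₂)).map Prod.fst).Nodup := by
      have := hperm.nodup hndflat
      simpa [List.map_append] using this
    constructor
    · unfold pvStepA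
      rw [hitems, hu, pv_items_ofList _ (by simpa [List.append_assoc] using hndnew), hbump]
      simp [List.append_assoc]
    · rw [hbump]
      refine ⟨by simpa [List.append_assoc] using hPtot, hndnew, ?_⟩
      intro e he
      rcases List.mem_append.1 he with he | he
      · exact h1 e (List.mem_append_left _ (hhisub e he))
      · rcases List.mem_cons.1 he with rfl | he
        · dsimp; omega
        · rcases List.mem_append.1 he with he | he
          · exact h1 e (List.mem_append_left _ (hmsub e he))
          · exact h1 e (List.mem_append_right _ (List.mem_cons_of_mem _ he))

lemma pv_fold (xs : List String) :
    ∀ (d : PySem.Dict String Int) (l : List (String × Int)), d.items = l → pvInv l →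
      (xs.foldl pvStepA d).items = xs.foldl pvBump l ∧ pvInv (xs.foldl pvBump l) := by
  induction xs with
  | nil => intro d l hd hInv; exact ⟨hd, hInv⟩
  | cons x xs ih =>
    intro d l hd hInv
    obtain ⟨items⟩ := d
    cases hd
    obtain ⟨hstep, hinv'⟩ := pv_step_eq items x hInv
    simpa using ih (pvStepA (PySem.Dict.mk items) x) (pvBump items x) hstep hinv'

lemma pv_indices_eq (ngrams : List String) (s : String) :
    pvIndicesA ngrams s
      = (((PySem.List.enumerate ngrams).foldl
            (fun d p => d.modify p.2 [] (fun v => v ++ [p.1 + 1])) PySem.Dict.empty).get? s).getD [] := by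
  unfold pvIndicesA
  rw [PySem.List.foldl_append_if (fun j => PySem.List.pyGet? ngrams j == some s) (fun j : Int => j + 1)]
  rw [← PySem.Dict.getD_eq_get?_getD]
  rw [PySem.List.enumerate_eq_map_pyRange ngrams ""]
  rw [List.foldl_map]
  rw [← List.foldl_map (f := fun j : Int => (PySem.List.pyGetD ngrams j "", j + 1))
        (g := fun (d : PySem.Dict String (List Int)) (q : String × Int) => d.modify q.1 [] (fun v => v ++ [q.2]))]
  rw [PySem.Dict.getD_foldl_modify_append]
  rw [List.filter_map, List.map_map]
  have hempty : (PySem.Dict.empty : PySem.Dict String (List Int)).getD s [] = [] := by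
    simp [PySem.Dict.getD, PySem.Dict.get?, PySem.Dict.empty]
  rw [hempty, List.nil_append, List.nil_append]
  have hfil : List.filter ((fun p : String × Int => p.1 == s) ∘
        (fun j : Int => (PySem.List.pyGetD ngrams j "", j + 1))) (PySem.List.pyRange 0 (PySem.List.len ngrams))
      = List.filter (fun j => PySem.List.pyGet? ngrams j == some s) (PySem.List.pyRange 0 (PySem.List.len ngrams)) := by
    apply List.filter_congr
    intro j hj
    obtain ⟨hj0, hjn⟩ := PySem.List.mem_pyRange_one.1 hj
    obtain ⟨n, rfl⟩ : ∃ n : Nat, j = (n : Int) := ⟨j.toNat, (Int.toNat_of_nonneg hj0).symm⟩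
    have hn : n < ngrams.length := by
      simpa [PySem.List.len] using hjn
    have hg : PySem.List.pyGet? ngrams (n : Int) = some ngrams[n] := by
      rw [PySem.List.pyGet?_natCast]
      exact List.getElem?_eq_getElem hn
    simp [Function.comp, PySem.List.pyGetD, hg]
  rw [hfil]
  rfl

-- ---- characterisation of pvBump's fold: counts and last-occurrence order ----

-- index of the last occurrence of g in p (for g ∈ p)
def pvLst (p : List String) (g : String) : Nat := p.length - 1 - p.reverse.idxOf g

def pvRel (p : List String) (a b : String × Int) : Prop :=
  p.count b.1 < p.count a.1 ∨ (p.count a.1 = p.count b.1 ∧ pvLst p a.1 < pvLst p b.1)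

def pvInv2 (p : List String) (l : List (String × Int)) : Prop :=
  (l.map Prod.fst).Nodup ∧ (∀ e ∈ l, e.1 ∈ p ∧ e.2 = (p.count e.1 : Int))
    ∧ (∀ g ∈ p, g ∈ l.map Prod.fst) ∧ l.Pairwise (pvRel p)

lemma pv_lst_append_self (p : List String) (x : String) : pvLst (p ++ [x]) x = p.length := by
  simp [pvLst]

lemma pv_lst_append_ne (p : List String) (x g : String) (h : g ≠ x) :
    pvLst (p ++ [x]) g = pvLst p g := by
  simp only [pvLst, List.reverse_append, List.reverse_singleton, List.singleton_append,
    List.length_append, List.length_singleton]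
  rw [List.idxOf_cons_ne _ (Ne.symm h)]
  omega

lemma pv_lst_lt_length (p : List String) (g : String) (h : g ∈ p) : pvLst p g < p.length := by
  have : 0 < p.length := List.length_pos_of_mem h
  simp only [pvLst]
  omega

lemma pv_lst_cons_mem (y : String) (t : List String) (g : String) (h : g ∈ t) :
    pvLst (y :: t) g = pvLst t g + 1 := by
  have hr : g ∈ t.reverse := by simpa using h
  have hlt : t.reverse.idxOf g < t.reverse.length := List.idxOf_lt_length_of_mem hr
  simp only [pvLst, List.reverse_cons, List.length_cons, List.length_reverse] at *
  rw [List.idxOf_append_of_mem hr]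
  omega

lemma pv_lst_cons_self (y : String) (t : List String) (h : y ∉ t) :
    pvLst (y :: t) y = 0 := by
  have hr : y ∉ t.reverse := by simpa using h
  simp only [pvLst, List.reverse_cons, List.length_cons]
  rw [List.idxOf_append, if_neg hr]
  simp

-- keys with the same first component in a nodup-key list coincide
lemma pv_key_unique {l : List (String × Int)} (hnd : (l.map Prod.fst).Nodup)
    {a b : String × Int} (ha : a ∈ l) (hb : b ∈ l) (h : a.1 = b.1) : a = b :=
  List.inj_on_of_nodup_map hnd ha hb h

lemma pv_bump_inv2 (p : List String) (l : List (String × Int)) (x : String)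
    (h : pvInv2 p l) : pvInv2 (p ++ [x]) (pvBump l x) := by
  obtain ⟨hnd, hval, hcov, hpw⟩ := h
  have hcnt_ne : ∀ g : String, g ≠ x → (p ++ [x]).count g = p.count g := by
    intro g hg
    have : List.count g [x] = 0 := List.count_eq_zero.2 (by simp [hg])
    simp [List.count_append, this]
  have hcnt_x : (p ++ [x]).count x = p.count x + 1 := by
    simp [List.count_append]
  have hone : ∀ e ∈ l, (1 : Int) ≤ e.2 := by
    intro e he
    obtain ⟨hmem, hv⟩ := hval e he
    have : 0 < p.count e.1 := List.count_pos_iff.2 hmem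
    omega
  cases hfo : l.find? (fun e => e.1 == x) with
  | none =>
    have hxall : ∀ e ∈ l, (e.1 == x) = false := by
      intro e he
      simpa using List.find?_eq_none.1 hfo e he
    have hxne : ∀ e ∈ l, e.1 ≠ x := fun e he => by
      have := hxall e he; simp at this; exact this
    have hxp : x ∉ p := by
      intro hx
      obtain ⟨e, he, hfst⟩ := List.mem_map.1 (hcov x hx)
      exact hxne e he hfst
    have hc0 : p.count x = 0 := List.count_eq_zero.2 hxp
    have hbump : pvBump l x = l ++ [(x, 1)] := by
      unfold pvBump
      rw [hfo]
      simp only [Option.map_none, Option.getD_none]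
      rw [List.filter_eq_self.2 (fun e he => by
            simpa using lt_of_lt_of_le one_pos (hone e he)),
          List.filter_eq_nil_iff.2 (fun e he => by
            have := hone e he
            simp only [Bool.and_eq_true, decide_eq_true_eq]
            rintro ⟨h2, -⟩
            omega)]
      rfl
    rw [hbump]
    refine ⟨?_, ?_, ?_, ?_⟩
    · rw [List.map_append, List.nodup_append]
      refine ⟨hnd, by simp, ?_⟩
      intro a ha b hb
      have hbx : b = x := by simpa using hb
      subst hbx
      obtain ⟨e, he, hfst⟩ := List.mem_map.1 ha
      exact fun hax => hxne e he (hax ▸ hfst)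
    · intro e he
      rcases List.mem_append.1 he with he | he
      · obtain ⟨hmem, hv⟩ := hval e he
        exact ⟨List.mem_append_left _ hmem, by rw [hcnt_ne e.1 (hxne e he)]; exact hv⟩
      · simp only [List.mem_singleton] at he
        subst he
        refine ⟨List.mem_append_right _ (by simp), ?_⟩
        simp [hcnt_x, hc0]
    · intro g hg
      rcases List.mem_append.1 hg with hg | hg
      · rw [List.map_append]
        exact List.mem_append_left _ (hcov g hg)
      · simp only [List.mem_singleton] at hg
        subst hg
        rw [List.map_append]
        exact List.mem_append_right _ (by simp)
    · rw [List.pairwise_append]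
      refine ⟨?_, by simp, ?_⟩
      · refine hpw.imp_of_mem ?_
        intro a b ha hb hr
        have hna := hxne a ha
        have hnb := hxne b hb
        unfold pvRel at hr ⊢
        rw [hcnt_ne a.1 hna, hcnt_ne b.1 hnb,
            pv_lst_append_ne p x a.1 hna, pv_lst_append_ne p x b.1 hnb]
        exact hr
      · intro a ha b hb
        simp only [List.mem_singleton] at hb
        subst hb
        obtain ⟨hmem, hv⟩ := hval a ha
        have hna := hxne a ha
        have hc : 0 < p.count a.1 := List.count_pos_iff.2 hmem
        unfold pvRel
        rw [hcnt_ne a.1 hna, pv_lst_append_ne p x a.1 hna]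
        simp only [hcnt_x, hc0]
        rcases Nat.lt_or_ge 1 (p.count a.1) with hlt | hge
        · left; omega
        · right
          refine ⟨by omega, ?_⟩
          rw [pv_lst_append_self]
          exact pv_lst_lt_length p a.1 hmem
  | some e₀ =>
    have he₀x : e₀.1 = x := by simpa using List.find?_some hfo
    have he₀l : e₀ ∈ l := List.mem_of_find?_eq_some hfo
    obtain ⟨x', c⟩ := e₀
    dsimp at he₀x
    subst x'
    obtain ⟨hxp, hcval⟩ := hval (x, c) he₀l
    dsimp at hxp hcval
    have huniq : ∀ e ∈ l, e.1 = x → e = (x, c) := by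
      intro e he hex
      exact pv_key_unique hnd he he₀l hex
    have hbump : pvBump l x
        = l.filter (fun e => decide (c < e.2))
          ++ (x, c + 1) :: l.filter (fun e => decide (e.2 ≤ c) && e.1 != x) := by
      unfold pvBump
      rw [hfo]
      rfl
    set hi := l.filter (fun e : String × Int => decide (c < e.2)) with hhidef
    set lo := l.filter (fun e : String × Int => decide (e.2 ≤ c) && e.1 != x) with hlodef
    have hhil : ∀ e ∈ hi, e ∈ l ∧ c < e.2 := by
      intro e he
      have := List.mem_filter.1 he
      exact ⟨this.1, by simpa using this.2⟩
    have hlol : ∀ e ∈ lo, e ∈ l ∧ e.2 ≤ c ∧ e.1 ≠ x := by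
      intro e he
      have := List.mem_filter.1 he
      refine ⟨this.1, ?_⟩
      have h2 := this.2
      simp only [Bool.and_eq_true, decide_eq_true_eq, bne_iff_ne, ne_eq] at h2
      exact h2
    have hhine : ∀ e ∈ hi, e.1 ≠ x := by
      intro e he hex
      obtain ⟨hel, hgt⟩ := hhil e he
      have := huniq e hel hex
      subst this
      exact absurd hgt (lt_irrefl c)
    -- every key of hi / lo is unchanged in count and last index
    have hchg : ∀ e : String × Int, e ∈ l → e.1 ≠ x →
        (p ++ [x]).count e.1 = p.count e.1 ∧ pvLst (p ++ [x]) e.1 = pvLst p e.1 :=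
      fun e he hne => ⟨hcnt_ne e.1 hne, pv_lst_append_ne p x e.1 hne⟩
    rw [hbump]
    refine ⟨?_, ?_, ?_, ?_⟩
    · -- nodup keys
      rw [List.map_append, List.nodup_append]
      refine ⟨(hnd.sublist (List.Sublist.map _ (List.filter_sublist))), ?_, ?_⟩
      · rw [List.map_cons, List.nodup_cons]
        refine ⟨?_, hnd.sublist (List.Sublist.map _ (List.filter_sublist))⟩
        intro hxin
        obtain ⟨e, he, hfst⟩ := List.mem_map.1 hxin
        exact (hlol e he).2.2 hfst
      · intro a ha b hb
        obtain ⟨e, he, rfl⟩ := List.mem_map.1 ha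
        rcases List.mem_cons.1 hb with rfl | hb
        · exact hhine e he
        · obtain ⟨f, hf, rfl⟩ := List.mem_map.1 hb
          intro hkey
          have heq := pv_key_unique hnd (hhil e he).1 (hlol f hf).1 hkey
          exact absurd ((hlol f hf).2.1) (not_le.2 (heq ▸ (hhil e he).2))
    · -- values
      intro e he
      rcases List.mem_append.1 he with he | he
      · obtain ⟨hel, -⟩ := hhil e he
        obtain ⟨hmem, hv⟩ := hval e hel
        exact ⟨List.mem_append_left _ hmem, by rw [(hchg e hel (hhine e he)).1]; exact hv⟩
      · rcases List.mem_cons.1 he with rfl | he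
        · refine ⟨List.mem_append_right _ (by simp), ?_⟩
          dsimp
          rw [hcnt_x]
          push_cast
          omega
        · obtain ⟨hel, -, hne⟩ := hlol e he
          obtain ⟨hmem, hv⟩ := hval e hel
          exact ⟨List.mem_append_left _ hmem, by rw [(hchg e hel hne).1]; exact hv⟩
    · -- coverage
      intro g hg
      rw [List.map_append, List.map_cons]
      rcases List.mem_append.1 hg with hg | hg
      · by_cases hgx : g = x
        · subst hgx
          exact List.mem_append_right _ (List.mem_cons_self)
        · obtain ⟨e, he, rfl⟩ := List.mem_map.1 (hcov g hg)
          obtain ⟨-, hv⟩ := hval e he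
          by_cases hle : e.2 ≤ c
          · refine List.mem_append_right _ (List.mem_cons_of_mem _ ?_)
            exact List.mem_map.2 ⟨e, List.mem_filter.2 ⟨he, by simp [hle, hgx]⟩, rfl⟩
          · exact List.mem_append_left _
              (List.mem_map.2 ⟨e, List.mem_filter.2 ⟨he, by simp [not_le.1 hle]⟩, rfl⟩)
      · simp only [List.mem_singleton] at hg
        subst hg
        exact List.mem_append_right _ (List.mem_cons_self)
    · -- pairwise
      have hupg : ∀ (q : String × Int → Bool), (∀ e ∈ l.filter q, e.1 ≠ x) →
          (l.filter q).Pairwise (pvRel (p ++ [x])) := by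
        intro q hne
        refine (hpw.filter q).imp_of_mem ?_
        intro a b ha hb hr
        have hca := hchg a (List.mem_filter.1 ha).1 (hne a ha)
        have hcb := hchg b (List.mem_filter.1 hb).1 (hne b hb)
        unfold pvRel at hr ⊢
        rw [hca.1, hca.2, hcb.1, hcb.2]
        exact hr
      rw [List.pairwise_append]
      refine ⟨hupg _ hhine, ?_, ?_⟩
      · rw [List.pairwise_cons]
        refine ⟨?_, hupg _ (fun e he => (hlol e he).2.2)⟩
        intro b hb
        obtain ⟨hel, hle, hne⟩ := hlol b hb
        obtain ⟨hmem, hv⟩ := hval b hel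
        unfold pvRel
        left
        dsimp
        rw [hcnt_x, (hchg b hel hne).1]
        omega
      · intro a ha b hb
        obtain ⟨hal, hgt⟩ := hhil a ha
        have hane := hhine a ha
        obtain ⟨hamem, hav⟩ := hval a hal
        have hca := hchg a hal hane
        rcases List.mem_cons.1 hb with rfl | hb
        · unfold pvRel
          dsimp
          rw [hcnt_x, hca.1]
          rcases Nat.lt_or_ge (p.count x + 1) (p.count a.1) with hlt | hge
          · left; omega
          · right
            refine ⟨by omega, ?_⟩
            rw [hca.2, pv_lst_append_self]
            exact pv_lst_lt_length p a.1 hamem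
        · obtain ⟨hbl, hble, hbne⟩ := hlol b hb
          obtain ⟨hbmem, hbv⟩ := hval b hbl
          have hcb := hchg b hbl hbne
          unfold pvRel
          left
          rw [hcnt_x] at *
          rw [hca.1, hcb.1]
          omega

lemma pv_fold_inv2 (rest : List String) :
    ∀ (p : List String) (l : List (String × Int)), pvInv2 p l →
      pvInv2 (p ++ rest) (rest.foldl pvBump l) := by
  induction rest with
  | nil => intro p l h; simpa using h
  | cons x rest ih =>
    intro p l h
    have := ih (p ++ [x]) (pvBump l x) (pv_bump_inv2 p l x h)
    simpa [List.append_assoc] using this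

-- the pair-fold of B's first loop splits into its two component folds
lemma pv_cl_fold (l : List (Int × String)) (a b : PySem.Dict String Int) :
    l.foldl (fun cl p => (cl.1.insert p.2 (cl.1.getD p.2 0 + 1), cl.2.insert p.2 p.1)) (a, b)
      = (l.foldl (fun d p => d.insert p.2 (d.getD p.2 0 + 1)) a,
         l.foldl (fun d p => d.insert p.2 p.1) b) := by
  induction l generalizing a b with
  | nil => rfl
  | cons y t ih => simpa using ih _ _

-- B's counts dict is Counter(ngrams)
lemma pv_counts_eq (ngrams : List String) :
    (PySem.List.enumerate ngrams).foldl
        (fun (d : PySem.Dict String Int) p => d.insert p.2 (d.getD p.2 0 + 1)) PySem.Dict.empty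
      = PySem.Dict.counter ngrams := by
  have h1 : (PySem.List.enumerate ngrams).foldl
        (fun (d : PySem.Dict String Int) p => d.insert p.2 (d.getD p.2 0 + 1)) PySem.Dict.empty
      = ((PySem.List.enumerate ngrams).map (fun p => p.2)).foldl
        (fun (d : PySem.Dict String Int) g => d.insert g (d.getD g 0 + 1)) PySem.Dict.empty := by
    rw [List.foldl_map]
  rw [h1, PySem.List.map_snd_enumerate, PySem.Dict.foldl_insert_getD_add_one_eq_counter]

-- B's last dict holds the index of the last occurrence
lemma pv_last_eq (ngrams : List String) :
    ∀ (s : Int) (d : PySem.Dict String Int) (g : String),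
      ((PySem.List.enumerate ngrams s).foldl
          (fun (d : PySem.Dict String Int) p => d.insert p.2 p.1) d).getD g 0
        = if g ∈ ngrams then s + (pvLst ngrams g : Int) else d.getD g 0 := by
  induction ngrams with
  | nil => intro s d g; simp [PySem.List.enumerate]
  | cons y t ih =>
    intro s d g
    rw [PySem.List.enumerate_cons, List.foldl_cons]
    rw [ih (s + 1) (d.insert y s) g]
    by_cases hgt : g ∈ t
    · rw [if_pos hgt, if_pos (List.mem_cons_of_mem _ hgt), pv_lst_cons_mem y t g hgt]
      push_cast
      ring
    · rw [if_neg hgt]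
      by_cases hgy : g = y
      · subst hgy
        rw [if_pos (List.mem_cons_self), pv_lst_cons_self g t hgt,
            PySem.Dict.getD_insert_self]
        simp
      · rw [if_neg (by simp [hgy, hgt]), PySem.Dict.getD_insert_of_ne _ _ _ hgy]

-- sorted2 with two Int keys is sorted with the lexicographic key
lemma pv_sorted2_eq_sorted_lex {α : Type} (xs : List α) (k1 k2 : α → Int) :
    PySem.List.sorted2 xs k1 k2 false
      = PySem.List.sorted xs (fun a => toLex (k1 a, k2 a)) false := by
  show List.foldl (fun acc x => PySem.List.insertBy _ x acc) [] xs
      = List.foldl (fun acc x => PySem.List.insertBy _ x acc) [] xs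
  have hb : (fun a b : α => decide (k1 a < k1 b) || (!decide (k1 b < k1 a) && decide (k2 a < k2 b)))
      = (fun a b : α => decide (toLex (k1 a, k2 a) < toLex (k1 b, k2 b))) := by
    funext a b
    rw [show (decide (toLex (k1 a, k2 a) < toLex (k1 b, k2 b)))
          = decide (k1 a < k1 b ∨ (k1 a = k1 b ∧ k2 a < k2 b)) from
        decide_eq_decide.2 Prod.Lex.toLex_lt_toLex]
    rcases lt_trichotomy (k1 a) (k1 b) with h | h | h
    · simp [h, asymm h]
    · simp [h]
    · have h1 : (decide (k1 a < k1 b)) = false := by simp [not_lt.2 (le_of_lt h)]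
      have h2 : (decide (k1 b < k1 a)) = true := by simp [h]
      have h3 : (k1 a = k1 b) = False := by simp [h.ne']
      simp [h1, h2, h3]
  rw [hb]

lemma pv_sorted2_eq_of_perm_of_pairwise {α : Type} (xs ys : List α) (k1 k2 : α → Int)
    (hperm : ys.Perm xs)
    (hpw : ys.Pairwise (fun a b => k1 a < k1 b ∨ (k1 a = k1 b ∧ k2 a < k2 b))) :
    PySem.List.sorted2 xs k1 k2 false = ys := by
  rw [pv_sorted2_eq_sorted_lex]
  exact PySem.List.sorted_eq_of_perm_of_pairwise_lt xs ys _ hperm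
    (hpw.imp (fun {a b} h => by
      rw [Prod.Lex.toLex_lt_toLex]
      exact h))

-- ===== VERDICT (by name: the statement is the Claim_ definition above) =====
theorem ngram_indices_spec : Claim_equal_ngram_indices := by
  intro ngrams _
  unfold Spec_ngram_indices
  -- the invariant of the counting loops
  have hInv2 : pvInv2 ngrams (ngrams.foldl pvBump []) := by
    have h0 : pvInv2 [] ([] : List (String × Int)) :=
      ⟨List.nodup_nil, by simp, by simp, List.Pairwise.nil⟩
    simpa using pv_fold_inv2 ngrams [] [] h0
  obtain ⟨hnd, hval, hcov, hpw⟩ := hInv2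
  set L := ngrams.foldl pvBump [] with hLdef
  -- lookup values of B's dicts
  have hk1 : ∀ g : String, (((PySem.Dict.counter ngrams).get? g).getD 0)
      = ((List.count g ngrams : Nat) : Int) := by
    intro g
    rw [← PySem.Dict.getD_eq_get?_getD, PySem.Dict.getD_counter]
  have hk2 : ∀ g ∈ ngrams,
      (((PySem.List.enumerate ngrams).foldl
          (fun (d : PySem.Dict String Int) p => d.insert p.2 p.1) PySem.Dict.empty).get? g).getD 0
        = ((pvLst ngrams g : Nat) : Int) := by
    intro g hg
    rw [← PySem.Dict.getD_eq_get?_getD, pv_last_eq ngrams 0 PySem.Dict.empty g, if_pos hg]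
    ring
  -- the sorted key list of B is exactly the key order of A's dict
  have hmemL : ∀ g : String, g ∈ L.map Prod.fst ↔ g ∈ ngrams := by
    intro g
    constructor
    · intro hg
      obtain ⟨e, he, rfl⟩ := List.mem_map.1 hg
      exact (hval e he).1
    · exact hcov g
  have hperm : (L.map Prod.fst).Perm (PySem.Dict.counter ngrams).keys := by
    rw [PySem.Dict.keys_counter]
    refine (List.perm_ext_iff_of_nodup hnd (PySem.Set.nodup_ofList ngrams)).2 ?_
    intro g
    rw [hmemL g, PySem.Set.mem_ofList]
  have horder : PySem.List.sorted2 (PySem.Dict.counter ngrams).keys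
        (fun g => -(((PySem.Dict.counter ngrams).get? g).getD 0))
        (fun g => (((PySem.List.enumerate ngrams).foldl
            (fun (d : PySem.Dict String Int) p => d.insert p.2 p.1) PySem.Dict.empty).get? g).getD 0)
        false
      = L.map Prod.fst := by
    refine pv_sorted2_eq_of_perm_of_pairwise _ _ _ _ hperm ?_
    rw [List.pairwise_map]
    refine hpw.imp_of_mem ?_
    intro a b ha hb hr
    have hma := (hval a ha).1
    have hmb := (hval b hb).1
    rw [hk1 a.1, hk1 b.1, hk2 a.1 hma, hk2 b.1 hmb]
    unfold pvRel at hr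
    rcases hr with hlt | ⟨heq, hlst⟩
    · left
      omega
    · right
      constructor
      · omega
      · exact_mod_cast hlst
  -- A's first component is L, and A's key list is L.map Prod.fst
  obtain ⟨hitems, hinvL⟩ := pv_fold ngrams PySem.Dict.empty [] rfl
    ⟨List.Pairwise.nil, List.nodup_nil, by simp⟩
  have hkeys : (ngrams.foldl pvStepA PySem.Dict.empty).keys = L.map Prod.fst := by
    simp only [PySem.Dict.keys, hitems, hLdef]
  -- evaluate both programs
  unfold ngram_indices ngram_indices_alt
  simp only [pv_cl_fold, pv_counts_eq]
  rw [horder]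
  -- A's second dict is a fold over fresh keys, as is each of B's output dicts
  have hA2 : ((ngrams.foldl pvStepA PySem.Dict.empty).keys.foldl
        (fun di i => di.insert i (pvIndicesA ngrams i)) PySem.Dict.empty).items
      = PySem.Dict.empty.items
        ++ (ngrams.foldl pvStepA PySem.Dict.empty).keys.map (fun i => (i, pvIndicesA ngrams i)) :=
    PySem.Dict.items_foldl_insert_fresh _ (fun i => i) (fun i => pvIndicesA ngrams i) _
      (fun a _ => by simp) (by rw [hkeys]; simpa using hnd)
  have hB1 : ((L.map Prod.fst).foldl
        (fun d g => d.insert g (((PySem.Dict.counter ngrams).get? g).getD 0)) PySem.Dict.empty).items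
      = PySem.Dict.empty.items
        ++ (L.map Prod.fst).map (fun g => (g, ((PySem.Dict.counter ngrams).get? g).getD 0)) :=
    PySem.Dict.items_foldl_insert_fresh _ (fun g => g) _ _ (fun a _ => by simp) (by simpa using hnd)
  have hB2 : ((L.map Prod.fst).foldl
        (fun d g => d.insert g ((((PySem.List.enumerate ngrams).foldl
            (fun d p => d.modify p.2 [] (fun v => v ++ [p.1 + 1])) PySem.Dict.empty).get? g).getD []))
        PySem.Dict.empty).items
      = PySem.Dict.empty.items
        ++ (L.map Prod.fst).map (fun g => (g, (((PySem.List.enumerate ngrams).foldl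
            (fun d p => d.modify p.2 [] (fun v => v ++ [p.1 + 1])) PySem.Dict.empty).get? g).getD [])) :=
    PySem.Dict.items_foldl_insert_fresh _ (fun g => g) _ _ (fun a _ => by simp) (by simpa using hnd)
  rw [hA2, hB1, hB2, hkeys]
  refine congrArg₂ Prod.mk ?_ ?_
  · -- first components: L itself
    rw [hitems, ← hLdef, List.map_map]
    symm
    conv_rhs => rw [show L = L.map id from (List.map_id L).symm]
    refine List.map_congr_left ?_
    intro e he
    have hv := (hval e he).2
    simp only [Function.comp, id]
    rw [hk1 e.1]
    exact Prod.ext rfl (by rw [← hv])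
  · -- second components: same keys, same index lists
    simp only [List.map_map]
    refine congrArg _ (List.map_congr_left ?_)
    intro e _
    simp only [Function.comp]
    rw [pv_indices_eq]
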